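-- pv_equiv track=rewrite | github.com/cobeng13/OnlineClassRecordHelper | OnlineClassRecordHelper.py | parse_excel_block
-- ===== SOURCE A (Python) =====
-- def parse_excel_block(txt, skip_blank=True):
--     rows = [r.replace("\r","") for r in txt.strip("\r\n").split("\n")]
--     vals = []
--     for r in rows:
--         cells = r.split("\t")
--         for c in cells:
--             v = c.strip()
--             if v == "" and skip_blank:
--                 vals.append("")
--             else:
--                 vals.append(v)
--     return vals
-- ===== SOURCE B (Python) =====
-- def parse_excel_block(txt, skip_blank=True):
--     # single pass: scan the stripped text once, splitting on tab/newline and dropping '\r' on the fly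
--     vals = []
--     cur = []
--     for ch in txt.strip("\r\n"):
--         if ch == "\r":
--             continue
--         if ch == "\t" or ch == "\n":
--             vals.append("".join(cur).strip())
--             cur = []
--         else:
--             cur.append(ch)
--     vals.append("".join(cur).strip())
--     return vals
-- ===== Notes on version B (the rewrite author's own statement) =====
-- stated objective: simpler
-- what changed: B replaces A's split-into-rows-then-split-each-row-into-cells nested loops (and the no-op skip_blank branch) with one character scan over the stripped text that emits a stripped cell at every tab or newline and drops carriage returns on the fly.
import Mathlib
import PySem

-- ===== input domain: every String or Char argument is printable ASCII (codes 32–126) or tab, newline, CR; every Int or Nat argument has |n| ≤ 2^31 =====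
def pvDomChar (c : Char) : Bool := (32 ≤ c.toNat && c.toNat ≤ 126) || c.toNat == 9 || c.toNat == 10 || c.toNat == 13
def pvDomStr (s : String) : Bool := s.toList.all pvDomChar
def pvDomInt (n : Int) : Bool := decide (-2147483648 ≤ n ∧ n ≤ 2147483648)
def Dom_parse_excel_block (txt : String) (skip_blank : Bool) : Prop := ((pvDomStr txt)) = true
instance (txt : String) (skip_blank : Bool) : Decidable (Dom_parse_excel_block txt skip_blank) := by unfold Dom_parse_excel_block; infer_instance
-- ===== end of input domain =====

-- B replaces A's nested row/cell split loops with one character scan that emits a stripped cell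
-- at each tab or newline and drops carriage returns on the fly (objective: simpler); same return value, no side effects.

-- ===== PORT A =====
-- rows = [r.replace("\r","") for r in txt.strip("\r\n").split("\n")]; nested loop appending c.strip()
def parse_excel_block (txt : String) (skip_blank : Bool) : List String :=
  let rows := (PySem.Chars.splitOn (PySem.Chars.stripChars txt.toList ['\r', '\n']) ['\n']).map
      (fun r => PySem.Chars.replace r ['\r'] [])
  rows.foldl (fun vals r =>
    (PySem.Chars.splitOn r ['\t']).foldl (fun vals c =>
      let v := PySem.Chars.strip c
      if v = [] ∧ skip_blank = true then vals ++ [""] else vals ++ [String.ofList v]) vals) []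

-- ===== PORT B =====
-- the scan loop of Source B: cur is the current cell (in reverse), flushed at tab/newline; carriage returns skipped
def pvBGo : List Char → List Char → List String
  | [], cur => [String.ofList (PySem.Chars.strip cur.reverse)]
  | c :: rest, cur =>
    if c = '\r' then pvBGo rest cur
    else if c = '\t' ∨ c = '\n' then String.ofList (PySem.Chars.strip cur.reverse) :: pvBGo rest []
    else pvBGo rest (c :: cur)

def parse_excel_block_alt (txt : String) (skip_blank : Bool) : List String :=
  pvBGo (PySem.Chars.stripChars txt.toList ['\r', '\n']) []

-- ===== PRECONDITION & SPEC =====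
def Spec_parse_excel_block (txt : String) (skip_blank : Bool) (out : List String) : Prop := out = parse_excel_block_alt txt skip_blank
instance (txt : String) (skip_blank : Bool) (out : List String) : Decidable (Spec_parse_excel_block txt skip_blank out) := by unfold Spec_parse_excel_block; infer_instance

-- ===== CLAIM (what is proved, stated in full; the proofs are below) =====
def Claim_equal_parse_excel_block : Prop := ∀ (txt : String) (skip_blank : Bool), Dom_parse_excel_block txt skip_blank → Spec_parse_excel_block txt skip_blank (parse_excel_block txt skip_blank)

-- ===== LEMMAS AND PROOFS =====

-- structural split on a single character (proof-side characterisation of PySem.Chars.splitOn)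
def splitChar (d : Char) : List Char → List (List Char)
  | [] => [[]]
  | c :: cs => if c = d then [] :: splitChar d cs else (splitChar d cs).modifyHead (c :: ·)

-- structural split on tab-or-newline
def splitTN : List Char → List (List Char)
  | [] => [[]]
  | c :: cs => if c = '\t' ∨ c = '\n' then [] :: splitTN cs else (splitTN cs).modifyHead (c :: ·)

theorem splitChar_ne_nil (d : Char) (cs : List Char) : splitChar d cs ≠ [] := by
  cases cs with
  | nil => simp [splitChar]
  | cons c cs =>
    simp only [splitChar]
    split_ifs
    · simp
    · cases h : splitChar d cs with
      | nil => exact absurd h (splitChar_ne_nil d cs)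
      | cons a t => simp

theorem splitTN_ne_nil (cs : List Char) : splitTN cs ≠ [] := by
  cases cs with
  | nil => simp [splitTN]
  | cons c cs =>
    simp only [splitTN]
    split_ifs
    · simp
    · cases h : splitTN cs with
      | nil => exact absurd h (splitTN_ne_nil cs)
      | cons a t => simp

theorem modifyHead_idfun {a : Type} (l : List a) : List.modifyHead (fun x => x) l = l := by
  cases l <;> simp

theorem splitOn_go_eq (d : Char) (fuel : Nat) (l cur : List Char) (acc : List (List Char))
    (h : l.length < fuel) :
    PySem.Chars.splitOn.go [d] fuel l cur acc
      = acc.reverse ++ (splitChar d l).modifyHead (cur.reverse ++ ·) := by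
  induction fuel generalizing l cur acc with
  | zero => omega
  | succ fuel ih =>
    cases l with
    | nil => simp [PySem.Chars.splitOn.go, splitChar]
    | cons c t =>
      simp only [PySem.Chars.splitOn.go]
      by_cases hc : c = d
      · subst hc
        have hp : List.isPrefixOf [c] (c :: t) = true := by simp [List.isPrefixOf]
        rw [if_pos hp]
        have hd : List.drop [c].length (c :: t) = t := rfl
        rw [hd, ih t [] (cur.reverse :: acc) (by simpa using Nat.lt_of_succ_lt_succ h)]
        simp [splitChar, modifyHead_idfun]
      · have hp : List.isPrefixOf [d] (c :: t) = false := by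
          simp [List.isPrefixOf]; exact fun hcd => absurd hcd.symm hc
        rw [if_neg (by simp [hp])]
        rw [ih t (c :: cur) acc (by simpa using Nat.lt_of_succ_lt_succ h)]
        simp only [splitChar, if_neg hc]
        cases hs : splitChar d t with
        | nil => exact absurd hs (splitChar_ne_nil d t)
        | cons a r => simp

theorem splitOn_eq_splitChar (d : Char) (s : List Char) :
    PySem.Chars.splitOn s [d] = splitChar d s := by
  unfold PySem.Chars.splitOn
  rw [splitOn_go_eq d (s.length + 1) s [] [] (by omega)]
  cases hs : splitChar d s with
  | nil => exact absurd hs (splitChar_ne_nil d s)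
  | cons a r => simp [List.modifyHead]

theorem replace_go_eq (d : Char) (fuel : Nat) (l acc : List Char) (h : l.length ≤ fuel) :
    PySem.Chars.replace.go [d] [] fuel l acc = acc.reverse ++ l.filter (· ≠ d) := by
  induction fuel generalizing l acc with
  | zero =>
    cases l with
    | nil => simp [PySem.Chars.replace.go]
    | cons c t => simp at h
  | succ fuel ih =>
    cases l with
    | nil => simp [PySem.Chars.replace.go]
    | cons c t =>
      simp only [PySem.Chars.replace.go]
      by_cases hc : c = d
      · subst hc
        have hp : List.isPrefixOf [c] (c :: t) = true := by simp [List.isPrefixOf]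
        rw [if_pos hp]
        have hd : List.drop [c].length (c :: t) = t := rfl
        have ha : ([] : List Char).reverse ++ acc = acc := rfl
        rw [hd, ha, ih t acc (by simpa using Nat.le_of_succ_le_succ h)]
        have hf : List.filter (· ≠ c) (c :: t) = List.filter (· ≠ c) t := by simp
        rw [hf]
      · have hp : List.isPrefixOf [d] (c :: t) = false := by
          simp [List.isPrefixOf]; exact fun hcd => absurd hcd.symm hc
        rw [if_neg (by simp [hp])]
        rw [ih t (c :: acc) (by simpa using Nat.le_of_succ_le_succ h)]
        have hf : List.filter (· ≠ d) (c :: t) = c :: List.filter (· ≠ d) t := by simp [hc]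
        rw [hf]
        simp

theorem replace_eq_filter (d : Char) (s : List Char) :
    PySem.Chars.replace s [d] [] = s.filter (· ≠ d) := by
  unfold PySem.Chars.replace
  simp only [List.isEmpty_cons, if_false, Bool.false_eq_true]
  exact replace_go_eq d s.length s [] (le_refl _)

theorem splitChar_filter (s : List Char) :
    splitChar '\n' (s.filter (· ≠ '\r')) = (splitChar '\n' s).map (List.filter (· ≠ '\r')) := by
  induction s with
  | nil => simp [splitChar]
  | cons c t ih =>
    by_cases hr : c = '\r'
    · subst hr
      have hf : List.filter (· ≠ '\r') ('\r' :: t) = List.filter (· ≠ '\r') t := by simp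
      rw [hf, ih]
      have hn : ¬ ('\r' : Char) = '\n' := by decide
      simp only [splitChar, if_neg hn]
      cases hs : splitChar '\n' t with
      | nil => exact absurd hs (splitChar_ne_nil _ _)
      | cons a r => simp [List.modifyHead]
    · have hf : List.filter (· ≠ '\r') (c :: t) = c :: List.filter (· ≠ '\r') t := by simp [hr]
      rw [hf]
      by_cases hn : c = '\n'
      · subst hn
        simp only [splitChar]
        rw [ih]
        simp
      · simp only [splitChar, if_neg hn]
        rw [ih]
        cases hs : splitChar '\n' t with
        | nil => exact absurd hs (splitChar_ne_nil _ _)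
        | cons a r =>
          have hfa : List.filter (· ≠ '\r') (c :: a) = c :: List.filter (· ≠ '\r') a := by simp [hr]
          simp only [List.modifyHead, List.map_cons]
          rw [hfa]

theorem splitTN_eq_flatMap (s : List Char) :
    splitTN s = (splitChar '\n' s).flatMap (splitChar '\t') := by
  induction s with
  | nil => simp [splitTN, splitChar]
  | cons c t ih =>
    by_cases hn : c = '\n'
    · subst hn
      simp only [splitTN, splitChar]
      rw [ih]
      rfl
    · by_cases ht : c = '\t'
      · subst ht
        simp only [splitTN, splitChar, if_neg hn]
        rw [ih]
        cases hs : splitChar '\n' t with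
        | nil => exact absurd hs (splitChar_ne_nil _ _)
        | cons a r =>
          simp only [List.modifyHead, List.flatMap_cons]
          have : splitChar '\t' ('\t' :: a) = [] :: splitChar '\t' a := by
            simp [splitChar]
          rw [this]
          rfl
      · simp only [splitTN, if_neg (by tauto : ¬(c = '\t' ∨ c = '\n')), splitChar, if_neg hn]
        rw [ih]
        cases hs : splitChar '\n' t with
        | nil => exact absurd hs (splitChar_ne_nil _ _)
        | cons a r =>
          simp only [List.modifyHead, List.flatMap_cons]
          have h1 : splitChar '\t' (c :: a) = (splitChar '\t' a).modifyHead (c :: ·) := by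
            simp [splitChar, ht]
          rw [h1]
          cases hs2 : splitChar '\t' a with
          | nil => exact absurd hs2 (splitChar_ne_nil _ _)
          | cons b q => simp [List.modifyHead]

theorem pvBGo_eq (s cur : List Char) :
    pvBGo s cur
      = ((splitTN (s.filter (· ≠ '\r'))).modifyHead (cur.reverse ++ ·)).map
          (fun p => String.ofList (PySem.Chars.strip p)) := by
  induction s generalizing cur with
  | nil => simp [pvBGo, splitTN]
  | cons c t ih =>
    by_cases hr : c = '\r'
    · subst hr
      have hf : List.filter (· ≠ '\r') ('\r' :: t) = List.filter (· ≠ '\r') t := by simp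
      simp only [pvBGo, hf]
      exact ih cur
    · have hf : List.filter (· ≠ '\r') (c :: t) = c :: List.filter (· ≠ '\r') t := by simp [hr]
      by_cases htn : c = '\t' ∨ c = '\n'
      · simp only [pvBGo, if_neg hr, if_pos htn, hf]
        rw [ih []]
        simp only [splitTN, if_pos htn]
        cases hs : splitTN (t.filter (· ≠ '\r')) with
        | nil => exact absurd hs (splitTN_ne_nil _)
        | cons a r => simp [List.modifyHead]
      · simp only [pvBGo, if_neg hr, if_neg htn, hf]
        rw [ih (c :: cur)]
        simp only [splitTN, if_neg htn]
        cases hs : splitTN (t.filter (· ≠ '\r')) with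
        | nil => exact absurd hs (splitTN_ne_nil _)
        | cons a r => simp [List.modifyHead]

theorem inner_foldl (skip_blank : Bool) (cells : List (List Char)) (vals : List String) :
    cells.foldl (fun vals c =>
      let v := PySem.Chars.strip c
      if v = [] ∧ skip_blank = true then vals ++ [""] else vals ++ [String.ofList v]) vals
    = vals ++ cells.map (fun c => String.ofList (PySem.Chars.strip c)) := by
  induction cells generalizing vals with
  | nil => simp
  | cons c t ih =>
    simp only [List.foldl, List.map]
    rw [ih]
    by_cases hv : PySem.Chars.strip c = [] ∧ skip_blank = true
    · rw [if_pos hv, hv.1]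
      have h0 : String.ofList ([] : List Char) = "" := rfl
      rw [h0]
      simp
    · rw [if_neg hv]
      simp

theorem outer_foldl (skip_blank : Bool) (rows : List (List Char)) :
    rows.foldl (fun vals r =>
      (PySem.Chars.splitOn r ['\t']).foldl (fun vals c =>
        let v := PySem.Chars.strip c
        if v = [] ∧ skip_blank = true then vals ++ [""] else vals ++ [String.ofList v]) vals) []
    = (rows.flatMap (fun r => splitChar '\t' r)).map (fun c => String.ofList (PySem.Chars.strip c)) := by
  have hF : (fun (vals : List String) r =>
      (PySem.Chars.splitOn r ['\t']).foldl (fun vals c =>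
        let v := PySem.Chars.strip c
        if v = [] ∧ skip_blank = true then vals ++ [""] else vals ++ [String.ofList v]) vals)
      = fun vals r => vals ++ (splitChar '\t' r).map (fun c => String.ofList (PySem.Chars.strip c)) := by
    funext vals r
    rw [splitOn_eq_splitChar, inner_foldl]
  rw [hF, PySem.List.foldl_append_eq_flatMap]
  simp [List.map_flatMap]

theorem pvBGo_nil_cur (s : List Char) :
    pvBGo s []
      = (splitTN (s.filter (· ≠ '\r'))).map (fun p => String.ofList (PySem.Chars.strip p)) := by
  rw [pvBGo_eq]
  cases hs : splitTN (s.filter (· ≠ '\r')) with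
  | nil => exact absurd hs (splitTN_ne_nil _)
  | cons a r => simp [List.modifyHead]

-- ===== VERDICT (by name: the statement is the Claim_ definition above) =====
theorem parse_excel_block_spec : Claim_equal_parse_excel_block := by
  intro txt skip_blank _
  unfold Spec_parse_excel_block parse_excel_block parse_excel_block_alt
  rw [pvBGo_nil_cur, splitTN_eq_flatMap, splitChar_filter, outer_foldl]
  simp only [splitOn_eq_splitChar, replace_eq_filter]
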